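-- pv_equiv track=rewrite | github.com/AnnaVitkina/transformation-dhl-3 | transform_other_tabs.py | _assign_gogreen_placeholder_labels
-- ===== SOURCE A (Python) =====
-- def _assign_gogreen_placeholder_labels(order, flags):
--     """
--     Origin-only  -> GoGreenOrigin_n
--     Dest-only    -> GoGreenDestination_n
--     In both      -> GoGreenOrigin_Destination_n
--     """
--     label_by_key = {}
--     o_only = [k for k in order if flags[k]['o'] and not flags[k]['d']]
--     d_only = [k for k in order if flags[k]['d'] and not flags[k]['o']]
--     both = [k for k in order if flags[k]['o'] and flags[k]['d']]
--     for i, k in enumerate(o_only, 1):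
--         label_by_key[k] = f'GoGreenOrigin_{i}'
--     for i, k in enumerate(d_only, 1):
--         label_by_key[k] = f'GoGreenDestination_{i}'
--     for i, k in enumerate(both, 1):
--         label_by_key[k] = f'GoGreenOrigin_Destination_{i}'
--     return label_by_key
-- ===== SOURCE B (Python) =====
-- def _assign_gogreen_placeholder_labels(order, flags):
--     """
--     Origin-only  -> GoGreenOrigin_n
--     Dest-only    -> GoGreenDestination_n
--     In both      -> GoGreenOrigin_Destination_n
--     """
--     b_origin, b_dest, b_both = [], [], []
--     c_origin = c_dest = c_both = 0
--     for k in order: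
--         o = flags[k]['o']
--         d = flags[k]['d']
--         if o and not d:
--             c_origin += 1
--             b_origin.append((k, f'GoGreenOrigin_{c_origin}'))
--         elif d and not o:
--             c_dest += 1
--             b_dest.append((k, f'GoGreenDestination_{c_dest}'))
--         elif o:
--             c_both += 1
--             b_both.append((k, f'GoGreenOrigin_Destination_{c_both}'))
--     return dict(b_origin + b_dest + b_both)
-- ===== Notes on version B (the rewrite author's own statement) =====
-- stated objective: simpler
-- what changed: Replaces three filtering comprehensions followed by three enumerate-labeling loops (six scans of order) with a single pass over order that classifies each key and builds the three labeled buckets with maintained counters, then concatenates them into the result dict.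
import Mathlib
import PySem

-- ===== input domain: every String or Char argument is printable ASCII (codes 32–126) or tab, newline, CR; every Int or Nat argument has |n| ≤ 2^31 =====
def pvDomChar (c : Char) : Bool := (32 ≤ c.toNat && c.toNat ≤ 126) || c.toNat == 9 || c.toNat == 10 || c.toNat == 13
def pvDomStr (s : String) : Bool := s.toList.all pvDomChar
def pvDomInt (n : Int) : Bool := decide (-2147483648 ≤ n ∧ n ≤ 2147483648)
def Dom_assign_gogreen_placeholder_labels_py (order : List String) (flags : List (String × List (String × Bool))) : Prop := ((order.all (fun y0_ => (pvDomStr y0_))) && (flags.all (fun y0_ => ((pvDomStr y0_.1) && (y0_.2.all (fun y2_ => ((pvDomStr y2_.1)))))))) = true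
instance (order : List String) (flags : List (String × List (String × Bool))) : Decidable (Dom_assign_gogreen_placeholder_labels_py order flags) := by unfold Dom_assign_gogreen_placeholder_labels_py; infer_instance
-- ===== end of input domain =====

-- B replaces A's three filtering comprehensions plus three labeling loops (six scans) by a single
-- classifying pass over `order` that builds the three labeled buckets with maintained counters
-- and concatenates them; objective: simpler (same O(n) cost).


-- flags[k][f] with default false; on inputs satisfying Pre_ the lookups always hit,
-- so the default is never observed (Python raises exactly where a lookup misses).
def pvGetFlag (flags : List (String × List (String × Bool))) (k f : String) : Bool :=
  (((((flags.find? (fun p => p.1 == k)).map Prod.snd).getD []).find?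
      (fun p => p.1 == f)).map Prod.snd).getD false

-- ===== PORT A =====
def assign_gogreen_placeholder_labels_py (order : List String) (flags : List (String × List (String × Bool))) : List (String × String) :=
  let o_only := order.filter (fun k => pvGetFlag flags k "o" && !pvGetFlag flags k "d")
  let d_only := order.filter (fun k => pvGetFlag flags k "d" && !pvGetFlag flags k "o")
  let both := order.filter (fun k => pvGetFlag flags k "o" && pvGetFlag flags k "d")
  let s1 := o_only.foldl (fun (s : PySem.Dict String String × Int) k =>
      (s.1.insert k ("GoGreenOrigin_" ++ PySem.Int.toStr s.2), s.2 + 1)) (PySem.Dict.empty, 1)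
  let s2 := d_only.foldl (fun (s : PySem.Dict String String × Int) k =>
      (s.1.insert k ("GoGreenDestination_" ++ PySem.Int.toStr s.2), s.2 + 1)) (s1.1, 1)
  let s3 := both.foldl (fun (s : PySem.Dict String String × Int) k =>
      (s.1.insert k ("GoGreenOrigin_Destination_" ++ PySem.Int.toStr s.2), s.2 + 1)) (s2.1, 1)
  s3.1.items

-- ===== PORT B =====
-- single pass: (bucket_origin, bucket_dest, bucket_both, c_origin, c_dest, c_both)
def assign_gogreen_placeholder_labels_py_alt (order : List String) (flags : List (String × List (String × Bool))) : List (String × String) :=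
  let st := order.foldl
    (fun (s : List (String × String) × List (String × String) × List (String × String) × Int × Int × Int) k =>
      let o := pvGetFlag flags k "o"
      let d := pvGetFlag flags k "d"
      let (b1, b2, b3, c1, c2, c3) := s
      if o && !d then (b1 ++ [(k, "GoGreenOrigin_" ++ PySem.Int.toStr (c1 + 1))], b2, b3, c1 + 1, c2, c3)
      else if d && !o then (b1, b2 ++ [(k, "GoGreenDestination_" ++ PySem.Int.toStr (c2 + 1))], b3, c1, c2 + 1, c3)
      else if o then (b1, b2, b3 ++ [(k, "GoGreenOrigin_Destination_" ++ PySem.Int.toStr (c3 + 1))], c1, c2, c3 + 1)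
      else (b1, b2, b3, c1, c2, c3))
    ([], [], [], 0, 0, 0)
  let (b1, b2, b3, _, _, _) := st
  ((b1 ++ b2 ++ b3).foldl (fun (d : PySem.Dict String String) p => d.insert p.1 p.2) PySem.Dict.empty).items

-- ===== PRECONDITION & SPEC =====
-- Pre_ excludes exactly the inputs on which Python raises KeyError: some key of `order`
-- missing from `flags`, or its inner dict missing 'o' or 'd'.
def Pre_assign_gogreen_placeholder_labels_py (order : List String) (flags : List (String × List (String × Bool))) : Prop :=
  ∀ k ∈ order,
    ((((flags.find? (fun p => p.1 == k)).map Prod.snd).bind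
        (fun inner => (inner.find? (fun p => p.1 == "o")).map Prod.snd)).isSome = true) ∧
    ((((flags.find? (fun p => p.1 == k)).map Prod.snd).bind
        (fun inner => (inner.find? (fun p => p.1 == "d")).map Prod.snd)).isSome = true)
instance (order : List String) (flags : List (String × List (String × Bool))) : Decidable (Pre_assign_gogreen_placeholder_labels_py order flags) := by unfold Pre_assign_gogreen_placeholder_labels_py; infer_instance

def pvWitness_assign_gogreen_placeholder_labels_py : List String × (List (String × List (String × Bool))) :=
  (["a", "b", "c"], [("a", [("o", true), ("d", false)]), ("b", [("o", true), ("d", true)]), ("c", [("o", false), ("d", true)])])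

def Spec_assign_gogreen_placeholder_labels_py (order : List String) (flags : List (String × List (String × Bool))) (out : List (String × String)) : Prop := out = assign_gogreen_placeholder_labels_py_alt order flags
instance (order : List String) (flags : List (String × List (String × Bool))) (out : List (String × String)) : Decidable (Spec_assign_gogreen_placeholder_labels_py order flags out) := by unfold Spec_assign_gogreen_placeholder_labels_py; infer_instance

-- ===== CLAIM (what is proved, stated in full; the proofs are below) =====
def Claim_equal_assign_gogreen_placeholder_labels_py : Prop := ∀ (order : List String) (flags : List (String × List (String × Bool))), Dom_assign_gogreen_placeholder_labels_py order flags → Pre_assign_gogreen_placeholder_labels_py order flags → Spec_assign_gogreen_placeholder_labels_py order flags (assign_gogreen_placeholder_labels_py order flags)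

-- ===== LEMMAS AND PROOFS =====

-- the label sequence a prefix/start-index pair produces over a list of keys
def pvLabels (pre : String) (i : Int) : List String → List (String × String)
  | [] => []
  | k :: t => (k, pre ++ PySem.Int.toStr i) :: pvLabels pre (i + 1) t

-- A's enumerate-labeling loop = inserting the label sequence
theorem pvFoldA (pre : String) (xs : List String) (d : PySem.Dict String String) (i : Int) :
    xs.foldl (fun (s : PySem.Dict String String × Int) k =>
        (s.1.insert k (pre ++ PySem.Int.toStr s.2), s.2 + 1)) (d, i)
      = ((pvLabels pre i xs).foldl (fun d p => d.insert p.1 p.2) d, i + xs.length) := by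
  induction xs generalizing d i with
  | nil => simp [pvLabels]
  | cons k t ih => simp [pvLabels, List.foldl_cons, ih]; omega

-- B's single pass produces exactly the three filtered, labeled buckets
theorem pvFoldB (flags : List (String × List (String × Bool))) (order : List String)
    (b1 b2 b3 : List (String × String)) (c1 c2 c3 : Int) :
    order.foldl
      (fun (s : List (String × String) × List (String × String) × List (String × String) × Int × Int × Int) k =>
        let o := pvGetFlag flags k "o"
        let d := pvGetFlag flags k "d"
        let (b1, b2, b3, c1, c2, c3) := s
        if o && !d then (b1 ++ [(k, "GoGreenOrigin_" ++ PySem.Int.toStr (c1 + 1))], b2, b3, c1 + 1, c2, c3)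
        else if d && !o then (b1, b2 ++ [(k, "GoGreenDestination_" ++ PySem.Int.toStr (c2 + 1))], b3, c1, c2 + 1, c3)
        else if o then (b1, b2, b3 ++ [(k, "GoGreenOrigin_Destination_" ++ PySem.Int.toStr (c3 + 1))], c1, c2, c3 + 1)
        else (b1, b2, b3, c1, c2, c3))
      (b1, b2, b3, c1, c2, c3)
    = (b1 ++ pvLabels "GoGreenOrigin_" (c1 + 1) (order.filter (fun k => pvGetFlag flags k "o" && !pvGetFlag flags k "d")),
       b2 ++ pvLabels "GoGreenDestination_" (c2 + 1) (order.filter (fun k => pvGetFlag flags k "d" && !pvGetFlag flags k "o")),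
       b3 ++ pvLabels "GoGreenOrigin_Destination_" (c3 + 1) (order.filter (fun k => pvGetFlag flags k "o" && pvGetFlag flags k "d")),
       c1 + (order.filter (fun k => pvGetFlag flags k "o" && !pvGetFlag flags k "d")).length,
       c2 + (order.filter (fun k => pvGetFlag flags k "d" && !pvGetFlag flags k "o")).length,
       c3 + (order.filter (fun k => pvGetFlag flags k "o" && pvGetFlag flags k "d")).length) := by
  induction order generalizing b1 b2 b3 c1 c2 c3 with
  | nil => simp [pvLabels]
  | cons k t ih =>
    cases ho : pvGetFlag flags k "o" <;> cases hd : pvGetFlag flags k "d" <;>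
      · simp only [List.foldl_cons, ho, hd, Bool.not_true,
          Bool.and_false, Bool.true_and, Bool.false_and, if_true]
        rw [ih]
        simp [ho, hd, pvLabels, List.append_assoc]
        all_goals omega

-- ===== VERDICT (by name: the statement is the Claim_ definition above) =====
theorem assign_gogreen_placeholder_labels_py_spec : Claim_equal_assign_gogreen_placeholder_labels_py := by
  intro order flags _ _
  unfold Spec_assign_gogreen_placeholder_labels_py
  unfold assign_gogreen_placeholder_labels_py assign_gogreen_placeholder_labels_py_alt
  rw [pvFoldB]
  simp only [pvFoldA, List.nil_append]
  rw [← List.foldl_append, ← List.foldl_append]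
  norm_num
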